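-- pv_equiv track=rewrite | github.com/aculage/SovietTasks | task4_9.py | process_traverses
-- ===== SOURCE A (Python) =====
-- def process_traverses(traverse):
--     dict_ = {}
--     for letter in traverse:
--         if letter not in dict_.keys():
--             dict_[letter] = 1
--         else:
--             dict_[letter] += 1
--
--     for i in dict_:
--         if dict_.get(i)>1 :
--             return(traverse[traverse.find(str(i)):traverse.rfind(str(i))+1])
-- ===== SOURCE B (Python) =====
-- def process_traverses(traverse):
--     # First index whose character reappears later is the first occurrence of
--     # the first (in order of first appearance) repeated character.
--     for i, ch in enumerate(traverse):
--         if ch in traverse[i + 1:]: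
--             return traverse[i:traverse.rfind(ch) + 1]
--     return None
-- ===== Notes on version B (the rewrite author's own statement) =====
-- stated objective: simpler
-- what changed: B drops A's dict-building pass and key rescan entirely: one enumerate pass returns at the first position whose character reappears later in the string, using that position directly as the left slice bound instead of calling find.
import Mathlib
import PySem

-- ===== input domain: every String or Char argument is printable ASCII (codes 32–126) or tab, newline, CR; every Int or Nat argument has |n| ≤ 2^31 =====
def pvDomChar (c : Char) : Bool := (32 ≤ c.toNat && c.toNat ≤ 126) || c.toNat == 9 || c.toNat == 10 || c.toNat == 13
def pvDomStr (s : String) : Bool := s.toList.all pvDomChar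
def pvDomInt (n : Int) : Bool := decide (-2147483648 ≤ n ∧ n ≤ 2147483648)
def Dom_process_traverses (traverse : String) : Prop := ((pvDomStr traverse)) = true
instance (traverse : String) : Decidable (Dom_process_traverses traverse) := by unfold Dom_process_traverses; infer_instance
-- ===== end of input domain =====

-- B replaces A's frequency-dict pass + key rescan by a single enumerate pass that fires at the
-- first position whose character reappears later (objective: simpler).

-- ===== PORT A =====
-- second loop of A: 'for i in dict_: if dict_.get(i) > 1: return traverse[find:rfind+1]'
-- (dict_.get(i) is ported as getD i 0; every scanned i is a key of dict_, so the default is never read)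
def pvAScan (traverse : String) (d : PySem.Dict Char Int) : List Char → Option String
  | [] => none
  | i :: rest =>
    if 1 < d.getD i 0 then
      some (PySem.Str.slice traverse (some (PySem.Str.find traverse (String.ofList [i])))
              (some (PySem.Str.rfind traverse (String.ofList [i]) + 1)))
    else pvAScan traverse d rest

def process_traverses (traverse : String) : Option String :=
  let dict_ : PySem.Dict Char Int :=
    traverse.toList.foldl (fun d letter =>
      if ¬ d.contains letter then d.insert letter 1
      else d.insert letter (d.getD letter 0 + 1)) PySem.Dict.empty
  pvAScan traverse dict_ dict_.keys

-- ===== PORT B =====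
-- 'for i, ch in enumerate(traverse): if ch in traverse[i+1:]: return traverse[i:traverse.rfind(ch)+1]'
def pvBScan (traverse : String) : Nat → List Char → Option String
  | _, [] => none
  | i, ch :: rest =>
    if PySem.Str.isIn (String.ofList [ch]) (PySem.Str.slice traverse (some ((i : Int) + 1)) none) then
      some (PySem.Str.slice traverse (some ((i : Int)))
              (some (PySem.Str.rfind traverse (String.ofList [ch]) + 1)))
    else pvBScan traverse (i + 1) rest

def process_traverses_alt (traverse : String) : Option String :=
  pvBScan traverse 0 traverse.toList

-- ===== PRECONDITION & SPEC =====
def Spec_process_traverses (traverse : String) (out : Option String) : Prop := out = process_traverses_alt traverse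
instance (traverse : String) (out : Option String) : Decidable (Spec_process_traverses traverse out) := by unfold Spec_process_traverses; infer_instance

-- ===== CLAIM (what is proved, stated in full; the proofs are below) =====
def Claim_equal_process_traverses : Prop := ∀ (traverse : String), Dom_process_traverses traverse → Spec_process_traverses traverse (process_traverses traverse)

-- ===== LEMMAS AND PROOFS =====

-- the value both programs return for the winning character c
def pvSpan (t : String) (c : Char) : String :=
  PySem.Str.slice t (some (PySem.Str.find t (String.ofList [c])))
    (some (PySem.Str.rfind t (String.ofList [c]) + 1))

-- A's build loop equals the Counter fold
lemma pvFold_eq_counter (L : List Char) :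
    L.foldl (fun d letter =>
      if ¬ d.contains letter then d.insert letter 1
      else d.insert letter (d.getD letter 0 + 1)) PySem.Dict.empty
      = PySem.Dict.counter L := by
  rw [← PySem.Dict.foldl_insert_getD_add_one_eq_counter]
  congr 1
  funext d x
  by_cases h : d.contains x
  · simp [h]
  · simp only [Bool.not_eq_true] at h
    simp [h, PySem.Dict.getD_of_not_contains d 0 h]

-- A's scan is find? of the repeated-count predicate, mapped through pvSpan
lemma pvAScan_eq_find? (t : String) (ks : List Char) :
    pvAScan t (PySem.Dict.counter t.toList) ks
      = (ks.find? (fun c => decide (1 < t.toList.count c))).map (pvSpan t) := by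
  induction ks with
  | nil => rfl
  | cons c rest ih =>
    rw [pvAScan]
    by_cases h : 1 < t.toList.count c
    · simp [PySem.Dict.getD_counter, h, pvSpan]
    · simp [PySem.Dict.getD_counter, h, ih]

-- find of a single character that first occurs right after the prefix P
lemma pvFind_singleton (t : String) (P S : List Char) (c : Char)
    (hL : t.toList = P ++ c :: S) (hc : c ∉ P) :
    PySem.Str.find t (String.ofList [c]) = (P.length : Int) := by
  have hpref : ∀ (l : List Char), ([c] <+: l) ↔ l.head? = some c := by
    intro l
    constructor
    · rintro ⟨u, rfl⟩; rfl
    · intro h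
      cases l with
      | nil => simp at h
      | cons a u => simp at h; exact ⟨u, by simp [h]⟩
  have hmem : c ∈ t.toList := by rw [hL]; simp
  have h0 : 0 ≤ PySem.Chars.find t.toList [c] :=
    (PySem.Chars.find_nonneg_iff t.toList [c]).mpr ((List.singleton_infix_iff c t.toList).mpr hmem)
  obtain ⟨hat, hmin⟩ := PySem.Chars.find_spec (s := t.toList) (sub := [c]) h0
  have hP : [c] <+: t.toList.drop P.length := by
    rw [hL, List.drop_left]
    exact ⟨S, rfl⟩
  have hnot : ∀ j < P.length, ¬ ([c] <+: t.toList.drop j) := by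
    intro j hj hp
    rw [hpref, hL, List.drop_append_of_le_length (le_of_lt hj)] at hp
    cases h : P.drop j with
    | nil =>
      have : (P.drop j).length = 0 := by simp [h]
      simp at this; omega
    | cons a u =>
      rw [h] at hp
      simp at hp
      exact hc (List.mem_of_mem_drop (by rw [h, hp]; exact List.mem_cons_self))
  have hf : (PySem.Chars.find t.toList [c]).toNat = P.length := by
    by_contra hne
    rcases Nat.lt_or_ge (PySem.Chars.find t.toList [c]).toNat P.length with h | h
    · exact hnot _ h hat
    · exact hmin P.length (by omega) hP
  have hle := PySem.Chars.find_le_length (s := t.toList) (sub := [c])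
  simp only [PySem.Str.find_eq, String.toList_ofList]
  omega

-- B's test 'ch in traverse[i+1:]' is membership of c in the dropped tail
lemma pvIsIn_cond (t : String) (i : Nat) (c : Char) :
    PySem.Str.isIn (String.ofList [c]) (PySem.Str.slice t (some ((i : Int) + 1)) none)
      = decide (c ∈ t.toList.drop (i + 1)) := by
  rcases h : decide (c ∈ t.toList.drop (i + 1)) with _ | _
  · simp at h
    rw [Bool.eq_false_iff]
    intro hin
    rw [PySem.Str.isIn_iff_infix] at hin
    simp only [String.toList_ofList, PySem.Str.toList_slice, PySem.Chars.slice_eq_listSlice] at hin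
    rw [show ((i : Int) + 1) = (((i + 1 : Nat)) : Int) by push_cast; ring,
        PySem.List.slice_from_natCast] at hin
    exact h ((List.singleton_infix_iff c _).mp hin)
  · simp at h
    rw [PySem.Str.isIn_iff_infix]
    simp only [String.toList_ofList, PySem.Str.toList_slice, PySem.Chars.slice_eq_listSlice]
    rw [show ((i : Int) + 1) = (((i + 1 : Nat)) : Int) by push_cast; ring,
        PySem.List.slice_from_natCast]
    exact (List.singleton_infix_iff c _).mpr h

-- main induction: scanning the suffix S (prefix P already passed, all its chars unrepeated)
-- agrees with A's scan over the keys in first-occurrence order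
lemma pvMain (t : String) :
    ∀ (S P : List Char), t.toList = P ++ S → (∀ c ∈ P, t.toList.count c = 1) →
      pvBScan t P.length S
        = ((PySem.Set.ofList t.toList).find? (fun c => decide (1 < t.toList.count c))).map (pvSpan t) := by
  intro S
  induction S with
  | nil =>
    intro P hL inv
    rw [pvBScan]
    symm
    rw [Option.map_eq_none_iff, List.find?_eq_none]
    intro c hcmem
    have : c ∈ t.toList := (PySem.Set.mem_ofList _ _).mp hcmem
    rw [hL, List.append_nil] at this
    simp [inv c this]
  | cons c S' ih =>
    intro P hL inv
    have hcP : c ∉ P := by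
      intro hin
      have h1 := inv c hin
      rw [hL, List.count_append, List.count_cons_self] at h1
      have := List.count_pos_iff.mpr hin
      omega
    have hdrop : t.toList.drop (P.length + 1) = S' := by
      rw [hL, show P ++ c :: S' = (P ++ [c]) ++ S' by simp,
          show P.length + 1 = (P ++ [c]).length by simp, List.drop_left]
    rw [pvBScan, pvIsIn_cond, hdrop]
    by_cases hmem : c ∈ S'
    · simp only [hmem, decide_true, if_true]
      have hofl : PySem.Set.ofList t.toList
          = PySem.Set.ofList P ++ c :: (PySem.Set.discard (PySem.Set.ofList S') c).filter
              (fun y => !(PySem.Set.contains (PySem.Set.ofList P) y)) := by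
        rw [hL, PySem.Set.ofList_append, PySem.Set.update_eq_append_filter, PySem.Set.ofList_cons]
        congr 1
        rw [List.filter_cons]
        simp [PySem.Set.contains, hcP]
      rw [hofl, List.find?_append]
      have hleft : (PySem.Set.ofList P).find? (fun c => decide (1 < t.toList.count c)) = none := by
        rw [List.find?_eq_none]
        intro d hd
        have : d ∈ P := (PySem.Set.mem_ofList _ _).mp hd
        simp [inv d this]
      have hcnt : 1 < t.toList.count c := by
        rw [hL, List.count_append, List.count_cons_self]
        have := List.count_pos_iff.mpr hmem
        omega
      rw [hleft, List.find?_cons_of_pos (by simpa using hcnt)]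
      simp only [Option.none_or, Option.map_some]
      unfold pvSpan
      rw [pvFind_singleton t P S' c hL hcP]
    · simp only [hmem, decide_false]
      have hcnt1 : t.toList.count c = 1 := by
        rw [hL, List.count_append, List.count_cons_self, List.count_eq_zero.mpr hcP,
            List.count_eq_zero.mpr hmem]
      have := ih (P ++ [c]) (by rw [hL]; simp) (by
        intro d hd
        rcases List.mem_append.mp hd with h | h
        · exact inv d h
        · simp at h; subst h; exact hcnt1)
      simpa using this

-- ===== VERDICT (by name: the statement is the Claim_ definition above) =====
theorem process_traverses_spec : Claim_equal_process_traverses := by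
  intro t _
  unfold Spec_process_traverses process_traverses process_traverses_alt
  rw [pvFold_eq_counter, pvAScan_eq_find?, PySem.Dict.keys_counter]
  exact (pvMain t t.toList [] rfl (by simp)).symm
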